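-- pv_equiv track=rewrite | github.com/Lvgr1947/cp_problems | 11-bonusplaythreediceyahtzee-Python/playstep2.py | notMatched
-- ===== SOURCE A (Python) =====
-- def notMatched(hand):
-- 	for i in range(len(hand)):
-- 		count = 0
-- 		for j in range(len(hand)):
-- 			if(hand[i] != hand[j]):
-- 				count += 1
-- 		if count == 2:
-- 			return i
-- ===== SOURCE B (Python) =====
-- def notMatched(hand):
--     # Group-by approach: tally each distinct value once, then pick the first
--     # distinct value (in first-occurrence order) whose multiplicity is
--     # len(hand) - 2, and return the position of its first occurrence.
--     counts = {}
--     for x in hand: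
--         counts[x] = counts.get(x, 0) + 1
--     n = len(hand)
--     for v, c in counts.items():
--         if c == n - 2:
--             return hand.index(v)
--     return None
-- ===== Notes on version B (the rewrite author's own statement) =====
-- stated objective: faster
-- what changed: B groups the hand once into a value->count dict and then scans the distinct values (not the indices): the first distinct value with multiplicity len(hand)-2 wins and its first position is returned via hand.index, replacing A's quadratic per-index counting scan.
import Mathlib
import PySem

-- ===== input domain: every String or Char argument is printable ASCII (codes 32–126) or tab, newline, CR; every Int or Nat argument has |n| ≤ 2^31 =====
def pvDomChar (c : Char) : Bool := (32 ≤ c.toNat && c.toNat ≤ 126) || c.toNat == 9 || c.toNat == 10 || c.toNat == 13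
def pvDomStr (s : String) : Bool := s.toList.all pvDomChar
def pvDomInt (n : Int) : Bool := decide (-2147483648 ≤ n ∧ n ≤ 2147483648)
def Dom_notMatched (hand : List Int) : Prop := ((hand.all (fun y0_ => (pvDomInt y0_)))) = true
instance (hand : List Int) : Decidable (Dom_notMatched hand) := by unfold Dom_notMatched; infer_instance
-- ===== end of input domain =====

-- B replaces A's nested index-by-index scan with a group-by: tally each distinct value once,
-- then pick the first distinct value whose multiplicity is len(hand)-2 and return its first position.

-- ===== PORT A =====
-- inner loop: count = number of j with hand[i] != hand[j]
def notMatchedCount (hand : List Int) (i : Int) : Int :=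
  (PySem.List.pyRange 0 (hand.length : Int) 1).foldl
    (fun count j =>
      if PySem.List.pyGetD hand i 0 ≠ PySem.List.pyGetD hand j 0 then count + 1 else count) 0

-- outer loop with early return
def notMatchedLoop (hand : List Int) : List Int → Option Int
  | [] => none
  | i :: rest =>
    if notMatchedCount hand i = 2 then some i else notMatchedLoop hand rest

def notMatched (hand : List Int) : Option Int :=
  notMatchedLoop hand (PySem.List.pyRange 0 (hand.length : Int) 1)

-- ===== PORT B =====
-- second loop: over the dict's (value, count) items in insertion order; hand.index(v) is
-- PySem.List.index? (its `none` = Python's ValueError, unreachable since v comes from hand)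
def notMatchedAltScan (hand : List Int) (n : Int) : List (Int × Int) → Option Int
  | [] => none
  | (v, c) :: rest =>
    if c = n - 2 then (PySem.List.index? hand v).map (fun i => (i : Int))
    else notMatchedAltScan hand n rest

def notMatched_alt (hand : List Int) : Option Int :=
  let counts := hand.foldl (fun d x => d.insert x (d.getD x 0 + 1)) PySem.Dict.empty
  notMatchedAltScan hand (hand.length : Int) counts.items

-- ===== PRECONDITION & SPEC =====
def Spec_notMatched (hand : List Int) (out : Option Int) : Prop := out = notMatched_alt hand
instance (hand : List Int) (out : Option Int) : Decidable (Spec_notMatched hand out) := by unfold Spec_notMatched; infer_instance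

-- ===== CLAIM (what is proved, stated in full; the proofs are below) =====
def Claim_equal_notMatched : Prop := ∀ (hand : List Int), Dom_notMatched hand → Spec_notMatched hand (notMatched hand)

-- ===== LEMMAS AND PROOFS =====

-- A's inner count equals n - (number of copies of hand[i]), for ANY i (pyGetD defaults agree)
theorem notMatchedCount_eq (hand : List Int) (i : Int) :
    notMatchedCount hand i =
      (hand.length : Int) - (hand.count (PySem.List.pyGetD hand i 0) : Int) := by
  unfold notMatchedCount
  rw [PySem.List.foldl_pyRange_zero_pyGetD' hand 0
       (fun count x => if PySem.List.pyGetD hand i 0 ≠ x then count + 1 else count) 0]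
  set v := PySem.List.pyGetD hand i 0 with hv
  have h : ∀ (init : Int) (l : List Int),
      l.foldl (fun count x => if v ≠ x then count + 1 else count) init
        = init + (l.countP (fun x => v ≠ x) : Int) := by
    intro init l
    induction l generalizing init with
    | nil => simp
    | cons y t ih =>
      simp only [List.foldl_cons, List.countP_cons, ih]
      by_cases hy : v = y
      · simp [hy]
      · simp [hy]; ring
  rw [h]
  have hsplit : hand.countP (fun x => decide (v ≠ x)) + hand.countP (fun a => decide ¬decide (v ≠ a) = true)
      = hand.length := (List.length_eq_countP_add_countP (l := hand)
        (p := fun x => decide (v ≠ x))).symm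
  have hcnt : hand.countP (fun a => decide ¬decide (v ≠ a) = true) = hand.count v := by
    simp only [List.count]
    apply List.countP_congr
    intro a _
    by_cases hav : v = a
    · subst hav; simp
    · simp [hav, Ne.symm hav]
  rw [hcnt] at hsplit
  omega

-- A's outer loop is a find? over the index list
theorem notMatchedLoop_eq_find? (hand : List Int) (idxs : List Int) :
    notMatchedLoop hand idxs
      = idxs.find? (fun i => decide (notMatchedCount hand i = 2)) := by
  induction idxs with
  | nil => rfl
  | cons i rest ih =>
    by_cases h : notMatchedCount hand i = 2
    · simp [notMatchedLoop, h]
    · simp [notMatchedLoop, h, ih]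

-- B's scan is a find? over the items, followed by hand.index on the value found
theorem notMatchedAltScan_eq_find? (hand : List Int) (n : Int) (items : List (Int × Int)) :
    notMatchedAltScan hand n items
      = (items.find? (fun vc => decide (vc.2 = n - 2))).bind
          (fun vc => (PySem.List.index? hand vc.1).map (fun i => (i : Int))) := by
  induction items with
  | nil => rfl
  | cons vc rest ih =>
    obtain ⟨v, c⟩ := vc
    by_cases h : c = n - 2
    · simp [notMatchedAltScan, h]
    · simp [notMatchedAltScan, h, ih]

-- find? with pointwise-on-members equal predicates
theorem find?_congr_mem {α : Type} (l : List α) (p q : α → Bool)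
    (h : ∀ x ∈ l, p x = q x) : l.find? p = l.find? q := by
  induction l with
  | nil => rfl
  | cons x t ih =>
    have hx := h x (List.mem_cons_self)
    by_cases hp : p x = true
    · simp [hp, hx ▸ hp]
    · have hq : q x = false := by rw [← hx]; simpa using hp
      simp [hp, hq, List.find?_cons_of_neg,
        ih (fun y hy => h y (List.mem_cons_of_mem _ hy))]

-- CORE: first index whose ELEMENT satisfies q = first occurrence of the first element satisfying q
theorem find?_range_eq_bind_idxOf? {α : Type} [BEq α] [LawfulBEq α]
    (q : α → Bool) (d : α) (l : List α) :
    (List.range l.length).find? (fun i => q (l.getD i d))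
      = (l.find? q).bind (fun v => List.idxOf? v l) := by
  induction l with
  | nil => rfl
  | cons x t ih =>
    rw [List.length_cons, List.range_succ_eq_map]
    by_cases hx : q x = true
    · simp [hx, List.idxOf?_cons]
    · have h1 : (List.find? (fun i => q ((x :: t).getD i d)) (List.map Nat.succ (List.range t.length)))
          = Option.map Nat.succ ((List.range t.length).find? (fun i => q (t.getD i d))) := by
        rw [List.find?_map]; rfl
      rw [show List.find? (fun i => q ((x :: t).getD i d)) (0 :: List.map Nat.succ (List.range t.length))
            = List.find? (fun i => q ((x :: t).getD i d)) (List.map Nat.succ (List.range t.length)) from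
          List.find?_cons_of_neg (by simpa using hx), h1, ih,
        List.find?_cons_of_neg hx]
      cases hf : t.find? q with
      | none => simp
      | some v =>
        have hv : q v = true := List.find?_some hf
        have hne : (x == v) = false := by
          by_cases hxv : x = v
          · subst hxv; exact absurd hv hx
          · simp [hxv]
        simp [List.idxOf?_cons, hne]

-- find? over Set.add-fold: new elements are appended, duplicates dropped
theorem find?_foldl_add {α : Type} [BEq α] [LawfulBEq α] (p : α → Bool) (t : List α) :
    ∀ (s : List α),
      (t.foldl PySem.Set.add s).find? p
        = (s.find? p).or (t.find? (fun y => p y && !(PySem.Set.contains s y))) := by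
  induction t with
  | nil => intro s; simp
  | cons x r ih =>
    intro s
    simp only [List.foldl_cons]
    rw [ih]
    by_cases hmem : PySem.Set.contains s x = true
    · have hadd : PySem.Set.add s x = s := by
        unfold PySem.Set.add; rw [if_pos hmem]
      rw [hadd, List.find?_cons_of_neg (p := fun y => p y && !PySem.Set.contains s y)
        (show ¬(p x && !PySem.Set.contains s x) = true by rw [hmem]; simp)]
    · have hmem' : PySem.Set.contains s x = false := by simpa using hmem
      have hadd : PySem.Set.add s x = s ++ [x] := by
        unfold PySem.Set.add; rw [if_neg hmem]
      rw [hadd, List.find?_append]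
      have hcontains : ∀ y, PySem.Set.contains (s ++ [x]) y = (PySem.Set.contains s y || (x == y)) := by
        intro y
        by_cases h2 : y = x
        · subst h2; simp [PySem.Set.contains]
        · have hxy : x ≠ y := fun h' => h2 h'.symm
          by_cases h : y ∈ s <;> simp [PySem.Set.contains, h, h2, hxy]
      cases hs : List.find? p s with
      | some w => simp
      | none =>
        simp only [Option.none_or]
        by_cases hpx : p x = true
        · rw [show List.find? p [x] = some x from by simp [hpx]]
          rw [List.find?_cons_of_pos (p := fun y => p y && !PySem.Set.contains s y)
            (show (p x && !PySem.Set.contains s x) = true by rw [hpx, hmem']; simp)]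
          simp
        · have hpx' : p x = false := by simpa using hpx
          rw [show List.find? p [x] = none from by simp [hpx']]
          rw [List.find?_cons_of_neg (p := fun y => p y && !PySem.Set.contains s y)
            (show ¬(p x && !PySem.Set.contains s x) = true by rw [hpx']; simp)]
          simp only [Option.none_or]
          apply find?_congr_mem
          intro y _
          by_cases hpy : p y = true
          · have hyx : (x == y) = false := by
              by_cases hxy : x = y
              · subst hxy; exact absurd hpy hpx
              · simp [hxy]
            rw [hcontains, hyx]
            simp
          · have hpy' : p y = false := by simpa using hpy
            rw [hpy']; simp

-- B unfolded to a find? over hand itself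
theorem notMatched_alt_eq (hand : List Int) :
    notMatched_alt hand
      = (hand.find? (fun v => decide ((hand.count v : Int) = (hand.length : Int) - 2))).bind
          (fun v => (List.idxOf? v hand).map (fun i => (i : Int))) := by
  unfold notMatched_alt
  rw [PySem.Dict.foldl_insert_getD_add_one_eq_counter, notMatchedAltScan_eq_find?,
    PySem.Dict.items_counter, List.find?_map]
  have hofl : PySem.Set.ofList hand = hand.foldl PySem.Set.add [] :=
    PySem.Set.ofList_eq_foldl hand
  rw [hofl, find?_foldl_add]
  simp only [List.find?_nil, Option.none_or]
  have hcongr : (hand.find? (fun y =>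
        (decide (((y, (hand.count y : Int)) : Int × Int).2 = (hand.length : Int) - 2))
          && !(PySem.Set.contains [] y)))
      = hand.find? (fun v => decide ((hand.count v : Int) = (hand.length : Int) - 2)) := by
    apply find?_congr_mem
    intro y _
    simp [PySem.Set.contains]
  rw [show (fun y => ((fun vc : Int × Int => decide (vc.2 = (hand.length : Int) - 2)) ∘
        (fun k => (k, (hand.count k : Int)))) y && !(PySem.Set.contains [] y))
      = (fun y => decide ((hand.count y : Int) = (hand.length : Int) - 2) && !(PySem.Set.contains [] y)) from rfl]
  rw [hcongr]
  cases hf : hand.find? (fun v => decide ((hand.count v : Int) = (hand.length : Int) - 2)) with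
  | none => simp
  | some v => simp [PySem.List.index?]

-- A unfolded to the same find?
theorem notMatched_eq (hand : List Int) :
    notMatched hand
      = (hand.find? (fun v => decide ((hand.count v : Int) = (hand.length : Int) - 2))).bind
          (fun v => (List.idxOf? v hand).map (fun i => (i : Int))) := by
  unfold notMatched
  rw [notMatchedLoop_eq_find?]
  rw [PySem.List.pyRange_zero_natCast, List.find?_map]
  have hcongr : ((List.range hand.length).find? ((fun i => decide (notMatchedCount hand i = 2)) ∘ (fun k : Nat => (k : Int))))
      = (List.range hand.length).find? (fun k : Nat =>
          (fun v => decide ((hand.count v : Int) = (hand.length : Int) - 2)) (hand.getD k 0)) := by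
    apply find?_congr_mem
    intro k hk
    simp only [Function.comp_apply, decide_eq_decide]
    rw [notMatchedCount_eq]
    rw [PySem.List.pyGetD_natCast]
    omega
  rw [hcongr,
    find?_range_eq_bind_idxOf? (fun v => decide ((hand.count v : Int) = (hand.length : Int) - 2)) 0 hand]
  cases hf : hand.find? (fun v => decide ((hand.count v : Int) = (hand.length : Int) - 2)) with
  | none => simp
  | some v => cases hi : List.idxOf? v hand <;> simp [hi]

-- ===== VERDICT (by name: the statement is the Claim_ definition above) =====
theorem notMatched_spec : Claim_equal_notMatched := by
  intro hand _
  unfold Spec_notMatched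
  rw [notMatched_eq, notMatched_alt_eq]
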